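-- pv_equiv track=rewrite | github.com/tkddls23/Code_Test_Study | 김지현/2-2) solution.py | solution
-- ===== SOURCE A (Python) =====
-- def solution(L, x):
--     if x not in L:
--         return [-1]
--
--     answer = []
--     index = L.index(x)
--
--     try:
--         while True:
--             answer.append(index)
--             index = L.index(x, index + 1)
--
--     except ValueError:
--         return answer
-- ===== SOURCE B (Python) =====
-- def solution(L, x):
--     answer = [i for i, v in enumerate(L) if v == x]
--     return answer if answer else [-1]
-- ===== Notes on version B (the rewrite author's own statement) =====
-- stated objective: simpler
-- what changed: Replaced the membership pre-check plus the exception-driven loop of repeated L.index(x, index+1) calls with a single enumerate comprehension collecting matching indices, falling back to [-1] when empty.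
import Mathlib
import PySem

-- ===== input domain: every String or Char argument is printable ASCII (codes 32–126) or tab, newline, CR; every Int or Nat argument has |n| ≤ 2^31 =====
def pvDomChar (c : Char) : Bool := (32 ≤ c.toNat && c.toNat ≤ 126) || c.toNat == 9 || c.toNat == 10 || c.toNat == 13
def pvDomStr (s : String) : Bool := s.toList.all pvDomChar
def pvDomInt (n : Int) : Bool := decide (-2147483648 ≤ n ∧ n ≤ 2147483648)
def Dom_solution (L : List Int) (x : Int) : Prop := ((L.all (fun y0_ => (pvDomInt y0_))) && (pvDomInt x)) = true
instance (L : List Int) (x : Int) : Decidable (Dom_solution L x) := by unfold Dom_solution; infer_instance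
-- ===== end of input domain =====

-- B replaces A's membership pre-check and exception-driven repeated L.index(x, index+1) loop
-- with a single enumerate comprehension collecting matching indices (objective: simpler).

-- ===== PORT A =====
-- L.index(x, s): first index ≥ s holding x (none = ValueError); exact for a Nat start
def indexFrom (L : List Int) (x : Int) (s : Nat) : Option Nat :=
  (PySem.List.index? (L.drop s) x).map (· + s)

theorem indexFrom_bounds {L : List Int} {x : Int} {s j : Nat}
    (h : indexFrom L x s = some j) : s ≤ j ∧ j < L.length := by
  unfold indexFrom at h
  cases hk : PySem.List.index? (L.drop s) x with
  | none => rw [hk] at h; simp at h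
  | some k =>
    rw [hk] at h; simp at h
    rcases (PySem.List.index?_eq_some_iff _ _ _).1 hk with ⟨pre, suf, hdec, hlen, _⟩
    have hL : (L.drop s).length = pre.length + 1 + suf.length := by
      rw [hdec]; simp; omega
    have hs : s ≤ L.length := by
      by_contra hns
      push_neg at hns
      have : L.drop s = [] := List.drop_eq_nil_of_le (by omega)
      rw [this] at hdec; simp at hdec
    have := List.length_drop (l := L) (i := s)
    omega

-- the try/while loop: answer.append(index); index = L.index(x, index+1), until ValueError
def aloop (L : List Int) (x : Int) (index : Nat) (answer : List Int) : List Int :=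
  let answer' := answer ++ [(index : Int)]
  match h : indexFrom L x (index + 1) with
  | none => answer'
  | some j => aloop L x j answer'
termination_by L.length - index
decreasing_by
  have := indexFrom_bounds h; omega

def solution (L : List Int) (x : Int) : List Int :=
  if x ∈ L then
    match PySem.List.index? L x with
    | some i => aloop L x i []
    | none => [-1]   -- unreachable: x ∈ L
  else [-1]

-- ===== PORT B =====
def solution_alt (L : List Int) (x : Int) : List Int :=
  let answer := ((PySem.List.enumerate L).filter (fun p => p.2 == x)).map (·.1)
  if answer = [] then [-1] else answer

-- ===== PRECONDITION & SPEC =====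
def Spec_solution (L : List Int) (x : Int) (out : List Int) : Prop := out = solution_alt L x
instance (L : List Int) (x : Int) (out : List Int) : Decidable (Spec_solution L x out) := by unfold Spec_solution; infer_instance

-- ===== CLAIM (what is proved, stated in full; the proofs are below) =====
def Claim_equal_solution : Prop := ∀ (L : List Int) (x : Int), Dom_solution L x → Spec_solution L x (solution L x)

-- ===== LEMMAS AND PROOFS =====

-- matching indices of x in L from position s on (B's comprehension restricted to a suffix)
def F (L : List Int) (x : Int) (s : Nat) : List Int :=
  ((PySem.List.enumerate (L.drop s) (s : Int)).filter (fun p => p.2 == x)).map (·.1)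

theorem filter_enumerate_nil {pre : List Int} {x : Int} (hx : x ∉ pre) (s : Int) :
    (PySem.List.enumerate pre s).filter (fun p => p.2 == x) = [] := by
  rw [List.filter_eq_nil_iff]
  intro p hp
  rcases (PySem.List.mem_enumerate_iff _ _ _).1 hp with ⟨k, hk, rfl⟩
  simp only [beq_iff_eq]
  intro hEq
  have hgk : pre[k] = x := hEq
  exact hx (hgk ▸ List.getElem_mem hk)

theorem F_none {L : List Int} {x : Int} {s : Nat}
    (h : indexFrom L x s = none) : F L x s = [] := by
  unfold indexFrom at h
  cases hk : PySem.List.index? (L.drop s) x with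
  | some k => rw [hk] at h; simp at h
  | none =>
    have hx : x ∉ L.drop s := (PySem.List.index?_eq_none_iff _ _).1 hk
    unfold F
    rw [filter_enumerate_nil hx]
    simp

theorem F_step {L : List Int} {x : Int} {s j : Nat}
    (h : indexFrom L x s = some j) : F L x s = (j : Int) :: F L x (j + 1) := by
  unfold indexFrom at h
  cases hk : PySem.List.index? (L.drop s) x with
  | none => rw [hk] at h; simp at h
  | some k =>
    rw [hk] at h; simp at h
    rcases (PySem.List.index?_eq_some_iff _ _ _).1 hk with ⟨pre, suf, hdec, hlen, hxpre⟩
    have hsle : s ≤ L.length := by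
      by_contra hns
      push_neg at hns
      have : L.drop s = [] := List.drop_eq_nil_of_le (by omega)
      rw [this] at hdec; simp at hdec
    have hsuf : L.drop (j + 1) = suf := by
      have h1 : L.drop (j + 1) = (L.drop s).drop (k + 1) := by
        rw [List.drop_drop]; congr 1; omega
      rw [h1, hdec]
      rw [show pre ++ x :: suf = (pre ++ [x]) ++ suf by simp]
      rw [List.drop_append_of_le_length (by simp; omega)]
      simp [hlen]
    unfold F
    rw [hdec, PySem.List.enumerate_append, List.filter_append,
        filter_enumerate_nil hxpre]
    rw [PySem.List.enumerate_cons]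
    rw [List.filter_cons_of_pos (by simp)]
    rw [hsuf]
    simp only [List.nil_append, List.map_cons, hlen]
    have h1 : (s : Int) + (k : Int) = (j : Int) := by push_cast; omega
    rw [h1, show (j : Int) + 1 = ((j + 1 : Nat) : Int) from by push_cast; ring]

theorem aloop_eq (L : List Int) (x : Int) (i : Nat) (acc : List Int) :
    aloop L x i acc = acc ++ ((i : Int) :: F L x (i + 1)) := by
  rw [aloop]
  split
  · next h =>
    rw [F_none h]
  · next j h =>
    have hb := indexFrom_bounds h
    rw [aloop_eq L x j (acc ++ [(i : Int)]), F_step h]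
    simp
termination_by L.length - i
decreasing_by omega

theorem F_zero_eq (L : List Int) (x : Int) :
    F L x 0 = ((PySem.List.enumerate L).filter (fun p => p.2 == x)).map (·.1) := by
  unfold F
  norm_num [PySem.List.enumerate]

theorem solution_spec : Claim_equal_solution := by
  intro L x _
  unfold Spec_solution solution solution_alt
  by_cases hmem : x ∈ L
  · simp only [hmem, if_true]
    have hsome : (PySem.List.index? L x).isSome :=
      (PySem.List.index?_isSome_iff _ _).2 hmem
    cases hi : PySem.List.index? L x with
    | none => rw [hi] at hsome; simp at hsome
    | some i =>
      have h0 : indexFrom L x 0 = some i := by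
        unfold indexFrom
        rw [List.drop_zero, hi]
        simp
      have hF0 : F L x 0 = (i : Int) :: F L x (i + 1) := F_step h0
      rw [F_zero_eq] at hF0
      show aloop L x i [] = _
      rw [aloop_eq]
      simp only [List.nil_append]
      have hne : ¬ (((PySem.List.enumerate L).filter (fun p => p.2 == x)).map (·.1) = []) := by
        rw [hF0]; simp
      rw [if_neg hne, ← hF0]
  · simp only [hmem, if_false]
    rw [filter_enumerate_nil hmem]
    simp
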